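-- pv_equiv track=rewrite | github.com/variety82/Algorithm | 프로그래머스/1/160586. 대충 만든 자판/대충 만든 자판.py | solution
-- ===== SOURCE A (Python) =====
-- from collections import defaultdict
--
-- def solution(keymap, targets):
--     key_dict = defaultdict(int)
--     answer = []
--     for key in keymap:
--         for idx, k in enumerate(key):
--             if key_dict[k] == 0:
--                 key_dict[k] = idx + 1
--             elif key_dict[k] > idx + 1:
--                 key_dict[k] = idx + 1
--
--     for target in targets:
--         num = 0
--         for t in target:
--             if key_dict[t] == 0:
--                 answer.append(-1)
--                 break
--             else:
--                 num += key_dict[t]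
--         else:
--             answer.append(num)
--     return answer
-- ===== SOURCE B (Python) =====
-- def solution(keymap, targets):
--     # No precomputed table: for each needed character, search all keymap
--     # occurrences directly and take the minimum 1-based position.
--     def cost(c):
--         hits = [i + 1 for k in keymap for i, ch in enumerate(k) if ch == c]
--         return min(hits) if hits else 0
--     out = []
--     for t in targets:
--         per = [cost(c) for c in t]
--         out.append(-1 if 0 in per else sum(per))
--     return out
-- ===== Notes on version B (the rewrite author's own statement) =====
-- stated objective: alternative
-- what changed: A precomputes a dict of minimum 1-based key positions in one pass over keymap and then looks targets up in it; B drops the dictionary entirely and answers each target character by a direct brute-force scan of every occurrence in keymap, taking the minimum on the fly (trading A's O(K+T) preprocessing-plus-lookup for a dictionary-free O(K*T) direct search).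
import Mathlib
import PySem

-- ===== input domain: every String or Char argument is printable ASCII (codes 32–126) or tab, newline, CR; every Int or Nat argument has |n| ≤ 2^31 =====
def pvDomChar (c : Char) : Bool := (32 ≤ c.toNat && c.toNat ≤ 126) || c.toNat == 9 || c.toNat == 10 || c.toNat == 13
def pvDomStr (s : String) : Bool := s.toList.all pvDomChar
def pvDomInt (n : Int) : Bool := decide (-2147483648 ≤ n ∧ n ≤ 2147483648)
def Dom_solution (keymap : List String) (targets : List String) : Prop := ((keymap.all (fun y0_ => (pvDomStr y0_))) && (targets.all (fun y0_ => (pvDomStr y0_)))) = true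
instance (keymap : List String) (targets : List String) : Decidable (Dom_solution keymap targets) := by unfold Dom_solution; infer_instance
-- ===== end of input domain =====

-- B drops A's precomputed min-position dictionary and answers each target character by a
-- direct scan of all keymap occurrences (objective: alternative); equivalence is about the
-- return value (A also mutates its private defaultdict while reading, unobservable to callers).

-- ===== PORT A =====
-- body of A's first loop: key_dict[k]==0 → set idx+1; elif key_dict[k] > idx+1 → set idx+1
def stepA (d : PySem.Dict Char Int) (p : Int × Char) : PySem.Dict Char Int :=
  let cur := d.getD p.2 0        -- defaultdict(int): a missing key reads as 0
  if cur == 0 then d.insert p.2 (p.1 + 1)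
  else if cur > p.1 + 1 then d.insert p.2 (p.1 + 1)
  else d

-- A's inner 'for t in target' with break/else; the defaultdict read key_dict[t] is getD _ 0
-- (the 0 that Python's defaultdict stores on that read is never observable in the result)
def targetA (d : PySem.Dict Char Int) : List Char → Int → Int
  | [], num => num
  | t :: ts, num => if d.getD t 0 == 0 then -1 else targetA d ts (num + d.getD t 0)

def solution (keymap : List String) (targets : List String) : List Int :=
  let key_dict := keymap.foldl
    (fun d key => (PySem.List.enumerate key.toList).foldl stepA d) PySem.Dict.empty
  targets.map (fun target => targetA key_dict target.toList 0)

-- ===== PORT B =====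
-- Source B cost(c): hits = [i+1 for k in keymap for i,ch in enumerate(k) if ch == c]
def costB (keymap : List String) (c : Char) : Int :=
  let hits := keymap.flatMap (fun k =>
    (PySem.List.enumerate k.toList).filterMap (fun p =>
      if p.2 == c then some (p.1 + 1) else none))
  match PySem.List.min? hits (fun x => x) with   -- min(hits) if hits else 0
  | some m => m
  | none => 0

def solution_alt (keymap : List String) (targets : List String) : List Int :=
  targets.map (fun t =>
    let per := t.toList.map (costB keymap)
    if per.contains 0 then -1 else per.sum)      -- -1 if 0 in per else sum(per)

-- ===== PRECONDITION & SPEC =====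
def Spec_solution (keymap : List String) (targets : List String) (out : List Int) : Prop := out = solution_alt keymap targets
instance (keymap : List String) (targets : List String) (out : List Int) : Decidable (Spec_solution keymap targets out) := by unfold Spec_solution; infer_instance

-- ===== CLAIM =====
def Claim_equal_solution : Prop := ∀ (keymap : List String) (targets : List String), Dom_solution keymap targets → Spec_solution keymap targets (solution keymap targets)

-- ===== LEMMAS AND PROOFS =====

-- the value A's update rule assigns: first write wins over 0, afterwards keep the minimum
def mergeA (cur v : Int) : Int := if cur = 0 then v else min cur v

theorem stepA_getD (d : PySem.Dict Char Int) (p : Int × Char) (c : Char) :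
    (stepA d p).getD c 0
      = if p.2 = c then mergeA (d.getD c 0) (p.1 + 1) else d.getD c 0 := by
  unfold stepA mergeA
  by_cases hc : p.2 = c
  · subst hc
    by_cases h0 : d.getD p.2 0 = 0
    · simp [h0]
    · by_cases hlt : d.getD p.2 0 > p.1 + 1
      · simp [h0, hlt]; omega
      · simp [h0, hlt]; omega
  · by_cases h0 : d.getD p.2 0 = 0
    · simp only [h0, beq_self_eq_true, if_true, PySem.Dict.getD_insert]
      simp [hc]
      exact fun h => absurd h.symm hc
    · by_cases hlt : d.getD p.2 0 > p.1 + 1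
      · simp only [h0, hlt, if_true, if_false, beq_iff_eq, PySem.Dict.getD_insert]
        simp [hc]
        exact fun h => absurd h.symm hc
      · simp [h0, hlt, hc]

-- hits of one enumerated character list, as Source B computes them
def hitsOf (ps : List (Int × Char)) (c : Char) : List Int :=
  ps.filterMap (fun p => if p.2 == c then some (p.1 + 1) else none)

theorem foldl_stepA_getD (ps : List (Int × Char)) (d : PySem.Dict Char Int) (c : Char) :
    (ps.foldl stepA d).getD c 0 = (hitsOf ps c).foldl mergeA (d.getD c 0) := by
  induction ps generalizing d with
  | nil => rfl
  | cons p ps ih =>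
    simp only [List.foldl_cons, ih, hitsOf, List.filterMap_cons]
    by_cases hc : p.2 = c
    · simp [hc, stepA_getD, List.foldl_cons]
    · simp [hc, stepA_getD]

-- A's final dictionary entry for c = fold of mergeA over ALL occurrence costs in keymap order
theorem build_getD (keymap : List String) (d : PySem.Dict Char Int) (c : Char) :
    (keymap.foldl (fun d key => (PySem.List.enumerate key.toList).foldl stepA d) d).getD c 0
      = (keymap.flatMap (fun k => hitsOf (PySem.List.enumerate k.toList) c)).foldl
          mergeA (d.getD c 0) := by
  induction keymap generalizing d with
  | nil => rfl
  | cons k ks ih =>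
    simp only [List.foldl_cons, List.flatMap_cons, List.foldl_append, ih, foldl_stepA_getD]

-- on positive entries mergeA from 0 is exactly the running minimum (= Python's min)
theorem foldl_mergeA_pos (vs : List Int) (v : Int) (hv : 1 ≤ v)
    (hvs : ∀ x ∈ vs, 1 ≤ x) : vs.foldl mergeA v = vs.foldl min v := by
  induction vs generalizing v with
  | nil => rfl
  | cons x xs ih =>
    have hx : 1 ≤ x := hvs x List.mem_cons_self
    have : mergeA v x = min v x := by unfold mergeA; split_ifs with h <;> omega
    simp only [List.foldl_cons, this]
    exact ih (min v x) (le_min hv hx) (fun y hy => hvs y (List.mem_cons_of_mem _ hy))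

theorem foldl_mergeA_zero (vs : List Int) (hvs : ∀ x ∈ vs, 1 ≤ x) :
    vs.foldl mergeA 0
      = match PySem.List.min? vs (fun x => x) with | some m => m | none => 0 := by
  cases vs with
  | nil => rfl
  | cons v t =>
    have hv : 1 ≤ v := hvs v List.mem_cons_self
    have h0 : mergeA 0 v = v := by unfold mergeA; simp
    rw [List.foldl_cons, h0, PySem.List.min?_id_cons,
      foldl_mergeA_pos t v hv (fun y hy => hvs y (List.mem_cons_of_mem _ hy))]

theorem hits_pos (keymap : List String) (c : Char) :
    ∀ x ∈ keymap.flatMap (fun k => hitsOf (PySem.List.enumerate k.toList) c), 1 ≤ x := by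
  intro x hx
  rcases List.mem_flatMap.mp hx with ⟨k, _, hk⟩
  rcases List.mem_filterMap.mp hk with ⟨p, hp, hpx⟩
  rcases (PySem.List.mem_enumerate_iff _ _ _).mp hp with ⟨j, hj, rfl⟩
  simp only at hpx
  split_ifs at hpx with h
  simp only [Option.some.injEq] at hpx
  omega

-- the built dictionary agrees with Source B's direct search
theorem build_eq_costB (keymap : List String) (c : Char) :
    (keymap.foldl (fun d key => (PySem.List.enumerate key.toList).foldl stepA d)
        PySem.Dict.empty).getD c 0 = costB keymap c := by
  rw [build_getD]
  have he : (PySem.Dict.empty : PySem.Dict Char Int).getD c 0 = 0 := by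
    simp [PySem.Dict.getD_of_not_contains, PySem.Dict.contains_empty]
  rw [he, foldl_mergeA_zero _ (hits_pos keymap c)]
  unfold costB hitsOf
  rfl

-- A's fused break/else loop = membership test then sum
theorem targetA_eq (d : PySem.Dict Char Int) (l : List Char) (num : Int) :
    targetA d l num
      = if (l.map (fun c => d.getD c 0)).contains 0 then -1
        else num + (l.map (fun c => d.getD c 0)).sum := by
  induction l generalizing num with
  | nil => simp [targetA]
  | cons c cs ih =>
    by_cases h0 : d.getD c 0 = 0
    · simp [targetA, h0]
    · have hb : (d.getD c 0 == 0) = false := by simpa using h0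
      simp only [targetA, hb, Bool.false_eq_true, if_false, ih, List.map_cons,
        List.contains_cons, List.sum_cons]
      have : (0 == d.getD c 0) = false := by simpa using fun h => h0 h.symm
      rw [this]
      simp only [Bool.false_or]
      split_ifs <;> [rfl; omega]

-- ===== VERDICT =====
theorem solution_spec : Claim_equal_solution := by
  intro keymap targets _
  unfold Spec_solution solution solution_alt
  apply List.map_congr_left
  intro t _
  rw [targetA_eq]
  have hm : t.toList.map (fun c =>
      (keymap.foldl (fun d key => (PySem.List.enumerate key.toList).foldl stepA d)
        PySem.Dict.empty).getD c 0) = t.toList.map (costB keymap) :=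
    List.map_congr_left (fun c _ => build_eq_costB keymap c)
  rw [hm]
  show _ = if (List.map (costB keymap) t.toList).contains 0 = true then (-1 : Int)
           else (List.map (costB keymap) t.toList).sum
  split_ifs <;> [rfl; omega]
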